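-- pv_equiv track=rewrite | github.com/Ahram-Ahn/mtRNAFeat | src/mtrnafeat/core/projection.py | sanitize_dangling
-- ===== SOURCE A (Python) =====
-- def sanitize_dangling(structure: str) -> str:
--     """Replace any unmatched bracket with '.' (left- and right-dangling)."""
--     chars = list(structure)
--     stack: list[int] = []
--     for i, ch in enumerate(chars):
--         if ch == "(":
--             stack.append(i)
--         elif ch == ")":
--             if stack:
--                 stack.pop()
--             else:
--                 chars[i] = "."
--     for i in stack:
--         chars[i] = "."
--     return "".join(chars)
-- ===== SOURCE B (Python) =====
-- def sanitize_dangling(structure: str) -> str: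
--     """Replace any unmatched bracket with '.' (left- and right-dangling)."""
--     chars = list(structure)
--     open_count = 0
--     for i, ch in enumerate(structure):
--         if ch == "(":
--             open_count += 1
--         elif ch == ")":
--             if open_count > 0:
--                 open_count -= 1
--             else:
--                 chars[i] = "."
--     close_count = 0
--     for i in range(len(structure) - 1, -1, -1):
--         ch = structure[i]
--         if ch == ")":
--             close_count += 1
--         elif ch == "(":
--             if close_count > 0:
--                 close_count -= 1
--             else:
--                 chars[i] = "."
--     return "".join(chars)
-- ===== Notes on version B (the rewrite author's own statement) =====
-- stated objective: simpler
-- what changed: Replaces the stack of open-bracket indices and the final stack-draining loop with two directional integer-counter passes (left-to-right marking dangling close brackets, then right-to-left over the original characters marking dangling open brackets), using O(1) auxiliary state instead of an O(n) index stack.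
import Mathlib
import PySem

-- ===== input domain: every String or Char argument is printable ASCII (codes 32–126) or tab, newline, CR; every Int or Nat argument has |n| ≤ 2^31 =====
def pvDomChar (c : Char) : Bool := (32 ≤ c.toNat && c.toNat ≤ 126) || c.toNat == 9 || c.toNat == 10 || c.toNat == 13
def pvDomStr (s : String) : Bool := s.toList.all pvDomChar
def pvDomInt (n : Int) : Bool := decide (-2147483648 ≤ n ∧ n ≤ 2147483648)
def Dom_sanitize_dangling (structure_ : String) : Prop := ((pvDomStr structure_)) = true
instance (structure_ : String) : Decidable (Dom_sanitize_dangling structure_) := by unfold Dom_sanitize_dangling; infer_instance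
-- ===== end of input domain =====

-- B replaces A's stack of indices by two directional integer-counter passes (left-to-right
-- for dangling close brackets, right-to-left for dangling open brackets); objective: simpler.

-- ===== PORT A =====
-- enumeration with a Nat index (indices produced by enumerate are the in-range positions 0..n-1)
def pvEnum : List Char → Nat → List (Nat × Char)
  | [], _ => []
  | c :: r, i => (i, c) :: pvEnum r (i + 1)

-- one step of A's loop body (state: current chars, stack of '(' indices, newest first)
def pvStepA (st : List Char × List Nat) (p : Nat × Char) : List Char × List Nat :=
  if p.2 = '(' then (st.1, p.1 :: st.2)
  else if p.2 = ')' then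
    match st.2 with
    | [] => (st.1.set p.1 '.', [])
    | _ :: t => (st.1, t)
  else st

def sanitize_dangling (structure_ : String) : String :=
  let chars := structure_.toList
  let res := (pvEnum chars 0).foldl pvStepA (chars, [])
  -- 'for i in stack' iterates oldest-first: reverse of the cons-front stack
  String.mk (res.2.reverse.foldl (fun c i => c.set i '.') res.1)

-- ===== PORT B =====
-- one step of B's first (left-to-right) pass (state: chars, open counter)
def pvStepB1 (st : List Char × Nat) (p : Nat × Char) : List Char × Nat :=
  if p.2 = '(' then (st.1, st.2 + 1)
  else if p.2 = ')' then
    if st.2 > 0 then (st.1, st.2 - 1) else (st.1.set p.1 '.', 0)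
  else st

-- one step of B's second (right-to-left) pass (state: chars, close counter)
def pvStepB2 (st : List Char × Nat) (p : Nat × Char) : List Char × Nat :=
  if p.2 = ')' then (st.1, st.2 + 1)
  else if p.2 = '(' then
    if st.2 > 0 then (st.1, st.2 - 1) else (st.1.set p.1 '.', 0)
  else st

def sanitize_dangling_alt (structure_ : String) : String :=
  let orig := structure_.toList
  let p1 := (pvEnum orig 0).foldl pvStepB1 (orig, 0)
  let p2 := ((pvEnum orig 0).reverse).foldl pvStepB2 (p1.1, 0)
  String.mk p2.1

-- ===== PRECONDITION & SPEC =====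
def Spec_sanitize_dangling (structure_ : String) (out : String) : Prop := out = sanitize_dangling_alt structure_
instance (structure_ : String) (out : String) : Decidable (Spec_sanitize_dangling structure_ out) := by unfold Spec_sanitize_dangling; infer_instance

-- ===== CLAIM (what is proved, stated in full; the proofs are below) =====
def Claim_equal_sanitize_dangling : Prop := ∀ (structure_ : String), Dom_sanitize_dangling structure_ → Spec_sanitize_dangling structure_ (sanitize_dangling structure_)

-- ===== LEMMAS AND PROOFS =====

-- indices marked '.' by a left-to-right pass started with counter k (both A's loop and B's pass 1)
def pvM1 : List (Nat × Char) → Nat → List Nat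
  | [], _ => []
  | (i, c) :: r, k =>
    if c = '(' then pvM1 r (k + 1)
    else if c = ')' then (if k > 0 then pvM1 r (k - 1) else i :: pvM1 r 0)
    else pvM1 r k

-- indices marked '.' by B's pass 2 started with counter k
def pvM2 : List (Nat × Char) → Nat → List Nat
  | [], _ => []
  | (i, c) :: r, k =>
    if c = ')' then pvM2 r (k + 1)
    else if c = '(' then (if k > 0 then pvM2 r (k - 1) else i :: pvM2 r 0)
    else pvM2 r k

-- the pure stack evolution of A's loop
def pvStk (S : List Nat) (p : Nat × Char) : List Nat :=
  if p.2 = '(' then p.1 :: S else if p.2 = ')' then S.tail else S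

theorem pv_foldA (l : List (Nat × Char)) : ∀ (chars : List Char) (S : List Nat),
    l.foldl pvStepA (chars, S) =
      ((pvM1 l S.length).foldl (fun c i => c.set i '.') chars, l.foldl pvStk S) := by
  induction l with
  | nil => intro chars S; rfl
  | cons p r ih =>
    intro chars S
    obtain ⟨i, c⟩ := p
    by_cases h1 : c = '('
    · simp [pvStepA, pvM1, pvStk, h1, ih]
    · by_cases h2 : c = ')'
      · cases S with
        | nil => simp [pvStepA, pvM1, pvStk, h1, h2, ih]
        | cons s t => simp [pvStepA, pvM1, pvStk, h1, h2, ih]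
      · simp [pvStepA, pvM1, pvStk, h1, h2, ih]

theorem pv_foldB1 (l : List (Nat × Char)) : ∀ (chars : List Char) (k : Nat),
    (l.foldl pvStepB1 (chars, k)).1 = (pvM1 l k).foldl (fun c i => c.set i '.') chars := by
  induction l with
  | nil => intro chars k; rfl
  | cons p r ih =>
    intro chars k
    obtain ⟨i, c⟩ := p
    by_cases h1 : c = '('
    · simp [pvStepB1, pvM1, h1, ih]
    · by_cases h2 : c = ')'
      · by_cases hk : k > 0
        · simp [pvStepB1, pvM1, h1, h2, hk, ih]
        · simp [pvStepB1, pvM1, h1, h2, hk, ih]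
      · simp [pvStepB1, pvM1, h1, h2, ih]

theorem pv_foldB2 (l : List (Nat × Char)) : ∀ (chars : List Char) (k : Nat),
    (l.foldl pvStepB2 (chars, k)).1 = (pvM2 l k).foldl (fun c i => c.set i '.') chars := by
  induction l with
  | nil => intro chars k; rfl
  | cons p r ih =>
    intro chars k
    obtain ⟨i, c⟩ := p
    by_cases h1 : c = ')'
    · simp [pvStepB2, pvM2, h1, ih]
    · by_cases h2 : c = '('
      · by_cases hk : k > 0
        · simp [pvStepB2, pvM2, h1, h2, hk, ih]
        · simp [pvStepB2, pvM2, h1, h2, hk, ih]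
      · simp [pvStepB2, pvM2, h1, h2, ih]

-- the marks of the right-to-left pass with counter k are the final stack minus its k newest entries
theorem pv_m2_eq_drop (l : List (Nat × Char)) : ∀ (k : Nat),
    pvM2 l k = (l.reverse.foldl pvStk []).drop k := by
  induction l with
  | nil => intro k; simp [pvM2]
  | cons p r ih =>
    intro k
    obtain ⟨i, c⟩ := p
    have hrev : (((i, c) :: r).reverse).foldl pvStk ([] : List Nat)
        = pvStk (r.reverse.foldl pvStk []) (i, c) := by
      simp [List.foldl_append]
    rw [hrev]
    set S := r.reverse.foldl pvStk [] with hS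
    by_cases h1 : c = ')'
    · have : S.tail.drop k = S.drop (k + 1) := by
        rw [← List.drop_one, List.drop_drop, Nat.add_comm 1 k]
      simp [pvM2, pvStk, h1, ih, this]
    · by_cases h2 : c = '('
      · by_cases hk : k > 0
        · obtain ⟨k', rfl⟩ : ∃ k', k = k' + 1 := ⟨k - 1, by omega⟩
          simp [pvM2, pvStk, h1, h2, hk, ih]
        · have hk0 : k = 0 := by omega
          simp [pvM2, pvStk, h1, h2, hk0, ih]
      · simp [pvM2, pvStk, h1, h2, ih]

-- setting '.' at a list of positions is order-insensitive
theorem pv_foldl_set_reverse (S : List Nat) (chars : List Char) :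
    S.reverse.foldl (fun c i => c.set i '.') chars = S.foldl (fun c i => c.set i '.') chars := by
  refine (List.reverse_perm S).foldl_eq' ?_ chars
  intro x _ y _ z
  by_cases hxy : x = y
  · subst hxy; rfl
  · exact List.set_comm _ _ hxy

-- ===== VERDICT (by name: the statement is the Claim_ definition above) =====
theorem sanitize_dangling_spec : Claim_equal_sanitize_dangling := by
  intro s _
  unfold Spec_sanitize_dangling sanitize_dangling sanitize_dangling_alt
  have hA := pv_foldA (pvEnum s.toList 0) s.toList []
  have hB1 := pv_foldB1 (pvEnum s.toList 0) s.toList 0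
  have hM2 := pv_m2_eq_drop ((pvEnum s.toList 0).reverse) 0
  rw [List.reverse_reverse] at hM2
  simp only [hA, hB1, pv_foldB2, hM2, List.drop_zero, List.length_nil]
  rw [pv_foldl_set_reverse]
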